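-- pv_equiv track=rewrite | github.com/pierreguillaumelaurin/advent-of-code-2018 | 04/part1.py | split_by_day
-- ===== SOURCE A (Python) =====
-- def split_by_day(schedule):
--     day_log = []
--     for line in schedule:
--         if "#" in line:
--             if day_log:
--                 yield day_log
--             day_log = [line]
--         else:
--             day_log.append(line)
-- ===== SOURCE B (Python) =====
-- def split_by_day(schedule):
--     # boundary-index-then-slice: find all '#' line indices, emit the leading
--     # non-'#' block (if any lines precede the first '#'), then one slice per
--     # consecutive pair of '#' indices; the block after the last '#' is never
--     # emitted, exactly as in the original.
--     lines = list(schedule)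
--     marks = [i for i, line in enumerate(lines) if "#" in line]
--     if marks and marks[0] > 0:
--         yield lines[:marks[0]]
--     for i, j in zip(marks, marks[1:]):
--         yield lines[i:j]
-- ===== Notes on version B (the rewrite author's own statement) =====
-- stated objective: alternative
-- what changed: Replaces A's stateful accumulator loop (carry a growing day_log, flush it on each '#' line) by a boundary-index-then-slice decomposition: collect the indices of all '#' lines once, yield the leading slice if non-empty, then one slice per consecutive pair of '#' indices (the segment after the last '#' is never produced, as in A).
import Mathlib
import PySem

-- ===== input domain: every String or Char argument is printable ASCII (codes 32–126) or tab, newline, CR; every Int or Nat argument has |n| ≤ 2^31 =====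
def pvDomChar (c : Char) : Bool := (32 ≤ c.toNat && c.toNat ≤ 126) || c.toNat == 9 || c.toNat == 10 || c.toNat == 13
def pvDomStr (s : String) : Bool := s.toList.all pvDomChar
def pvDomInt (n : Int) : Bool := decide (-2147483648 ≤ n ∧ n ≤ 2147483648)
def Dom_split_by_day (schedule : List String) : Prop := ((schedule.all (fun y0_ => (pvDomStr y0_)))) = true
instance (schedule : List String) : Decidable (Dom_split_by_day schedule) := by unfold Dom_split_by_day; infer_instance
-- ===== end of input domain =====

-- B replaces A's accumulator loop by a '#'-index scan plus slicing; equivalence of the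
-- returned group list is proved (both Pythons are generators; the lists of yielded values agree).

-- shared helper: Python's `"#" in line` (used verbatim by both programs)
def hasHash (line : String) : Bool := PySem.Str.isIn "#" line

-- ===== PORT A =====
-- A's generator, ported as the fold it is: state (yielded so far, day_log); result = yielded list.
def split_by_day (schedule : List String) : List (List String) :=
  (schedule.foldl
    (fun (st : List (List String) × List String) line =>
      if hasHash line then
        (if st.2.isEmpty then st.1 else st.1 ++ [st.2], [line])
      else
        (st.1, st.2 ++ [line]))
    ([], [])).1

-- ===== PORT B =====
-- B: marks = ['#'-line indices]; yield lines[:marks[0]] if marks and marks[0] > 0;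
--    then lines[i:j] for consecutive (i, j) in zip(marks, marks[1:]).
def split_by_day_alt (schedule : List String) : List (List String) :=
  let lines := schedule
  let marks : List Int :=
    ((PySem.List.enumerate lines).filter (fun p => hasHash p.2)).map Prod.fst
  let lead : List (List String) :=
    match marks with
    | [] => []
    | m :: _ => if 0 < m then [PySem.List.slice lines none (some m)] else []
  lead ++ (marks.zip marks.tail).map (fun p => PySem.List.slice lines (some p.1) (some p.2))

-- ===== PRECONDITION & SPEC =====
def Spec_split_by_day (schedule : List String) (out : List (List String)) : Prop := out = split_by_day_alt schedule
instance (schedule : List String) (out : List (List String)) : Decidable (Spec_split_by_day schedule out) := by unfold Spec_split_by_day; infer_instance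

-- ===== CLAIM (what is proved, stated in full; the proofs are below) =====
def Claim_equal_split_by_day : Prop := ∀ (schedule : List String), Dom_split_by_day schedule → Spec_split_by_day schedule (split_by_day schedule)

-- ===== LEMMAS AND PROOFS =====

-- common recursive characterisation: F acc ls = groups yielded with pending day_log acc
def F (acc : List String) : List String → List (List String)
  | [] => []
  | l :: ls =>
    if hasHash l then (if acc.isEmpty then [] else [acc]) ++ F [l] ls
    else F (acc ++ [l]) ls

-- Nat-valued mark indices, recursively
def marksN : List String → List Nat
  | [] => []
  | l :: ls => if hasHash l then 0 :: (marksN ls).map (· + 1) else (marksN ls).map (· + 1)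

-- Nat-level core of B
def Bn (lines : List String) (ms : List Nat) : List (List String) :=
  (match ms with
   | [] => []
   | m :: _ => if 0 < m then [lines.take m] else []) ++
  (ms.zip ms.tail).map (fun p => (lines.drop p.1).take (p.2 - p.1))

theorem foldA_eq_F (ls : List String) :
    ∀ (out : List (List String)) (acc : List String),
    (ls.foldl
      (fun (st : List (List String) × List String) line =>
        if hasHash line then
          (if st.2.isEmpty then st.1 else st.1 ++ [st.2], [line])
        else
          (st.1, st.2 ++ [line]))
      (out, acc)).1 = out ++ F acc ls := by
  induction ls with
  | nil => intro out acc; simp [F]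
  | cons l ls ih =>
    intro out acc
    rw [List.foldl_cons]
    by_cases h : hasHash l
    · rw [if_pos h]
      by_cases ha : acc.isEmpty
      · rw [if_pos ha, ih]
        simp [F, h, ha]
      · rw [if_neg ha, ih]
        simp [F, h, ha]
    · rw [if_neg h, ih]
      simp [F, h]

theorem cast_shift (M : List Nat) (s : Int) :
    M.map (fun (k : Nat) => ((k : Int) + (s + 1))) = (M.map (· + 1)).map (fun (k : Nat) => ((k : Int) + s)) := by
  rw [List.map_map]
  apply List.map_congr_left
  intro a _
  simp only [Function.comp]
  push_cast
  ring

theorem enum_marks (ls : List String) :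
    ∀ (s : Int),
    ((PySem.List.enumerate ls s).filter (fun p => hasHash p.2)).map Prod.fst
      = (marksN ls).map (fun (k : Nat) => ((k : Int) + s)) := by
  induction ls with
  | nil => intro s; simp [marksN, PySem.List.enumerate_nil]
  | cons l ls ih =>
    intro s
    rw [PySem.List.enumerate_cons, List.filter_cons]
    by_cases h : hasHash l
    · simp only [h, marksN, if_true, List.map_cons, ih (s + 1), cast_shift]
      simp
    · have hm : marksN (l :: ls) = (marksN ls).map (· + 1) := by simp [marksN, h]
      rw [hm, ← cast_shift, ← ih (s + 1)]
      simp [h]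

theorem alt_eq_Bn (lines : List String) :
    split_by_day_alt lines = Bn lines (marksN lines) := by
  unfold split_by_day_alt Bn
  dsimp only
  rw [enum_marks lines 0]
  simp only [add_zero]
  rw [← List.map_tail, List.zip_map, List.map_map]
  congr 1
  · cases h : marksN lines with
    | nil => rfl
    | cons m ms =>
      simp [PySem.List.slice_to_natCast]
  · apply List.map_congr_left
    intro p _
    rcases p with ⟨a, b⟩
    simp [PySem.List.slice_natCast]

theorem marksN_append (xs ys : List String) :
    marksN (xs ++ ys) = marksN xs ++ (marksN ys).map (· + xs.length) := by
  induction xs with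
  | nil => simp [marksN]
  | cons x xs ih =>
    by_cases h : hasHash x <;>
      simp [marksN, h, ih, List.map_map]

theorem marksN_nonhash (xs : List String) (h : ∀ x ∈ xs, hasHash x = false) :
    marksN xs = [] := by
  induction xs with
  | nil => rfl
  | cons x xs ih =>
    simp [marksN, h x (by simp)]
    exact ih (fun y hy => h y (by simp [hy]))

theorem pairs_shift (pre rest : List String) (M : List Nat) :
    ((M.map (· + pre.length)).zip (M.map (· + pre.length)).tail).map
        (fun p => ((pre ++ rest).drop p.1).take (p.2 - p.1))
      = (M.zip M.tail).map (fun p => (rest.drop p.1).take (p.2 - p.1)) := by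
  rw [← List.map_tail, List.zip_map, List.map_map]
  apply List.map_congr_left
  intro p _
  rcases p with ⟨a, b⟩
  simp only [Function.comp, Prod.map]
  rw [Nat.add_comm a pre.length, List.drop_length_add_append]
  congr 1
  omega

theorem Bn_split (acc rest : List String) (hacc : ∀ x ∈ acc.tail, hasHash x = false)
    (M' : List Nat) (hr : marksN rest = 0 :: M') :
    Bn (acc ++ rest) (marksN (acc ++ rest))
      = (if acc.isEmpty then [] else [acc]) ++ Bn rest (marksN rest) := by
  rw [marksN_append, hr]
  match acc, hacc with
  | [], _ => simp [Bn, marksN]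
  | a :: t, hacc =>
    have ht : marksN t = [] := marksN_nonhash t (by simpa using hacc)
    have hp := pairs_shift (a :: t) rest (0 :: M')
    have htake : List.take (t.length + 1) (a :: (t ++ rest)) = a :: t := by
      simp
    simp only [List.map_cons, Nat.zero_add, List.tail_cons, List.cons_append,
      List.length_cons] at hp
    by_cases h : hasHash a
    · have hm : marksN (a :: t) = [0] := by simp [marksN, h, ht]
      rw [hm]
      simp only [Bn, List.map_cons, Nat.zero_add, List.zip_cons_cons, List.tail_cons,
        Nat.lt_irrefl, if_false, Nat.sub_zero, List.drop_zero, List.cons_append,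
        List.nil_append, List.isEmpty_cons, List.length_cons]
      rw [htake, hp]
      simp
    · have hm : marksN (a :: t) = [] := by simp [marksN, h, ht]
      rw [hm]
      simp only [Bn, List.map_cons, Nat.zero_add, List.tail_cons,
        List.cons_append, List.nil_append, List.isEmpty_cons, List.length_cons,
        Nat.succ_pos, if_true, Nat.lt_irrefl, if_false]
      rw [htake, hp]
      simp

theorem Bn_eq_F (ls : List String) :
    ∀ (acc : List String), (∀ x ∈ acc.tail, hasHash x = false) →
    Bn (acc ++ ls) (marksN (acc ++ ls)) = F acc ls := by
  induction ls with
  | nil =>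
    intro acc hacc
    match acc, hacc with
    | [], _ => simp [Bn, marksN, F]
    | a :: t, hacc =>
      have ht : marksN t = [] := marksN_nonhash t (by simpa using hacc)
      by_cases h : hasHash a <;> simp [Bn, marksN, F, h, ht]
  | cons l ls ih =>
    intro acc hacc
    by_cases h : hasHash l
    · have hIH : Bn (l :: ls) (marksN (l :: ls)) = F [l] ls := by
        simpa using ih [l] (by simp)
      have hr : marksN (l :: ls) = 0 :: (marksN ls).map (· + 1) := by simp [marksN, h]
      rw [Bn_split acc (l :: ls) hacc _ hr, hIH]
      simp [F, h]
    · have he : acc ++ l :: ls = (acc ++ [l]) ++ ls := by simp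
      have htail : ∀ x ∈ (acc ++ [l]).tail, hasHash x = false := by
        cases acc with
        | nil => simpa using h
        | cons a t =>
          intro x hx
          simp at hx
          rcases hx with hx | hx
          · exact hacc x (by simp [hx])
          · simp [hx, h]
      rw [he, ih (acc ++ [l]) htail]
      simp [F, h]

theorem split_by_day_eq (s : List String) : split_by_day s = split_by_day_alt s := by
  have h1 : split_by_day s = F [] s := foldA_eq_F s [] []
  have h2 := Bn_eq_F s [] (by simp)
  simp only [List.nil_append] at h2
  rw [h1, alt_eq_Bn, h2]

-- ===== VERDICT (by name: the statement is the Claim_ definition above) =====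
theorem split_by_day_spec : Claim_equal_split_by_day := by
  intro s _
  unfold Spec_split_by_day
  exact split_by_day_eq s
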